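-- pv_equiv track=rewrite | github.com/xiaowulai-s/Equipment-Management | AsyncModbusClient.py | _smart_group_registers
-- ===== SOURCE A (Python) =====
-- from typing import Optional, List, Dict, Any
--
-- def _smart_group_registers(addresses: List[int], max_gap: int = 5) -> List[List[int]]:
--     """智能分组寄存器地址
--
--     将连续或接近连续的寄存器地址分组，减少通信次数
--
--     Args:
--         addresses: 寄存器地址列表
--         max_gap: 最大地址间隔
--
--     Returns:
--         List[List[int]]: 分组后的地址列表
--     """
--     if not addresses:
--         return []
--
--     sorted_addrs = sorted(addresses)
--     groups = [[sorted_addrs[0]]]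
--
--     for addr in sorted_addrs[1:]:
--         last_group = groups[-1]
--         if addr - last_group[-1] <= max_gap:
--             # 添加到当前组
--             last_group.append(addr)
--         else:
--             # 开始新组
--             groups.append([addr])
--
--     return groups
-- ===== SOURCE B (Python) =====
-- def _smart_group_registers(addresses, max_gap=5):
--     """Two-phase: find cut indices in the sorted list, then slice between them."""
--     s = sorted(addresses)
--     if not s:
--         return []
--     cuts = [i for i in range(1, len(s)) if s[i] - s[i - 1] > max_gap]
--     bounds = [0] + cuts + [len(s)]
--     return [s[a:b] for a, b in zip(bounds, bounds[1:])]
-- ===== Notes on version B (the rewrite author's own statement) =====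
-- stated objective: alternative
-- what changed: B replaces A's single growing-groups loop by two staged passes over the sorted list: a comprehension that collects the cut indices (where the gap to the previous address exceeds max_gap) and a second pass that slices the sorted list between consecutive bounds.
import Mathlib
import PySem

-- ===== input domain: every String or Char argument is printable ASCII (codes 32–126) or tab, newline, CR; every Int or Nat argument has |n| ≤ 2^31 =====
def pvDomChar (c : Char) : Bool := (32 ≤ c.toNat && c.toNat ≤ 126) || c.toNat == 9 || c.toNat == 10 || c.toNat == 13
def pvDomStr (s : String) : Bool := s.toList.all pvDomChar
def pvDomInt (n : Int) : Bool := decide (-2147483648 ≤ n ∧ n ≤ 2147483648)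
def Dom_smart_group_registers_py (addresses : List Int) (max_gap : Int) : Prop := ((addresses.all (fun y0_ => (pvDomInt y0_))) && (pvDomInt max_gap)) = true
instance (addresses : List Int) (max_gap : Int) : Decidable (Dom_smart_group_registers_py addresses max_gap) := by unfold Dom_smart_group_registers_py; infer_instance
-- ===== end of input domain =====

-- B replaces A's single growing-groups loop by two phases: a comprehension that finds the cut
-- indices in the sorted list, then slicing between consecutive bounds; objective: alternative.

-- ===== PORT A =====
-- one iteration of A's loop body: groups[-1] is getLastD, last_group[-1] is getLastD,
-- the in-place last_group.append(addr) is dropLast ++ [last_group ++ [addr]]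
def stepA (max_gap : Int) (groups : List (List Int)) (addr : Int) : List (List Int) :=
  let last_group := groups.getLastD []
  if addr - last_group.getLastD 0 ≤ max_gap then
    groups.dropLast ++ [last_group ++ [addr]]
  else
    groups ++ [[addr]]

def smart_group_registers_py (addresses : List Int) (max_gap : Int) : List (List Int) :=
  if addresses = [] then []
  else
    let sorted_addrs := PySem.List.sorted addresses (fun x => x) false
    -- sorted_addrs[0] (the list is nonempty here) and the loop over sorted_addrs[1:]
    (PySem.List.slice sorted_addrs (some 1) none).foldl (stepA max_gap) [[sorted_addrs.headD 0]]

-- ===== PORT B =====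
-- the cut-finding comprehension: [i for i in range(1, len(s)) if s[i] - s[i-1] > max_gap]
def cutsOf (max_gap : Int) (s : List Int) : List Int :=
  (PySem.List.pyRange 1 (PySem.List.len s) 1).filter
    (fun i => decide (PySem.List.pyGetD s i 0 - PySem.List.pyGetD s (i - 1) 0 > max_gap))

-- the slicing comprehension: [s[a:b] for a, b in zip(bounds, bounds[1:])] with bounds = [0] + cuts + [len(s)]
def groupsOf (s : List Int) (cuts : List Int) : List (List Int) :=
  let bounds := 0 :: (cuts ++ [PySem.List.len s])
  (bounds.zip (PySem.List.slice bounds (some 1) none)).map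
    (fun p => PySem.List.slice s (some p.1) (some p.2))

def smart_group_registers_py_alt (addresses : List Int) (max_gap : Int) : List (List Int) :=
  let s := PySem.List.sorted addresses (fun x => x) false
  if s = [] then []
  else groupsOf s (cutsOf max_gap s)

-- ===== PRECONDITION & SPEC =====
def Spec_smart_group_registers_py (addresses : List Int) (max_gap : Int) (out : List (List Int)) : Prop := out = smart_group_registers_py_alt addresses max_gap
instance (addresses : List Int) (max_gap : Int) (out : List (List Int)) : Decidable (Spec_smart_group_registers_py addresses max_gap out) := by unfold Spec_smart_group_registers_py; infer_instance

-- ===== CLAIM (what is proved, stated in full; the proofs are below) =====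
def Claim_equal_smart_group_registers_py : Prop := ∀ (addresses : List Int) (max_gap : Int), Dom_smart_group_registers_py addresses max_gap → Spec_smart_group_registers_py addresses max_gap (smart_group_registers_py addresses max_gap)

-- ===== LEMMAS AND PROOFS =====

-- proof-side middle ground: grouping as a backward fold (one step per address)
def stepB (max_gap : Int) (groups : List (List Int)) (addr : Int) : List (List Int) :=
  match groups with
  | [] => [[addr]]
  | g :: rest =>
    if g.headD 0 - addr ≤ max_gap then (addr :: g) :: rest
    else [addr] :: g :: rest

theorem stepA_single (g : Int) (gr : List Int) (a : Int) :
    stepA g [gr] a = if a - gr.getLastD 0 ≤ g then [gr ++ [a]] else [gr, [a]] := rfl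

theorem stepA_concat (g : Int) (gs : List (List Int)) (gr : List Int) (a : Int) :
    stepA g (gs ++ [gr]) a
      = if a - gr.getLastD 0 ≤ g then gs ++ [gr ++ [a]] else (gs ++ [gr]) ++ [[a]] := by
  simp [stepA]

-- A's loop never touches groups before the last one: any prefix splits off.
theorem foldl_stepA_append (g : Int) : ∀ (xs : List Int) (gs : List (List Int)) (gr : List Int),
    xs.foldl (stepA g) (gs ++ [gr]) = gs ++ xs.foldl (stepA g) [gr] := by
  intro xs
  induction xs with
  | nil => intro gs gr; simp
  | cons a xs ih =>
    intro gs gr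
    simp only [List.foldl_cons, stepA_concat, stepA_single]
    by_cases h : a - gr.getLastD 0 ≤ g
    · rw [if_pos h, if_pos h]
      exact ih gs (gr ++ [a])
    · rw [if_neg h, if_neg h, ih (gs ++ [gr]) [a],
        show ([gr, [a]] : List (List Int)) = [gr] ++ [[a]] from rfl, ih [gr] [a],
        List.append_assoc]

-- Consing onto the first (and only initial) group survives A's loop: the loop only reads the
-- last element, and the result's first group keeps its head.
theorem foldl_stepA_cons_head (g : Int) : ∀ (xs : List Int) (gr : List Int) (x : Int), gr ≠ [] →
    ∃ h t, xs.foldl (stepA g) [gr] = h :: t ∧ h.head? = gr.head? ∧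
      xs.foldl (stepA g) [x :: gr] = (x :: h) :: t := by
  intro xs
  induction xs with
  | nil => intro gr x _; exact ⟨gr, [], rfl, rfl, rfl⟩
  | cons a xs ih =>
    intro gr x hgr
    simp only [List.foldl_cons, stepA_single]
    have hlast : (x :: gr).getLastD 0 = gr.getLastD 0 := by
      cases gr with
      | nil => exact absurd rfl hgr
      | cons b bs => simp [List.getLastD]
    rw [hlast]
    by_cases h : a - gr.getLastD 0 ≤ g
    · rw [if_pos h, if_pos h]
      obtain ⟨h', t', h1, h2, h3⟩ := ih (gr ++ [a]) x (by simp)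
      refine ⟨h', t', h1, ?_, by simpa using h3⟩
      rw [h2]
      cases gr with
      | nil => exact absurd rfl hgr
      | cons b bs => simp
    · rw [if_neg h, if_neg h,
        show ([gr, [a]] : List (List Int)) = [gr] ++ [[a]] from rfl, foldl_stepA_append,
        show ([x :: gr, [a]] : List (List Int)) = [x :: gr] ++ [[a]] from rfl, foldl_stepA_append]
      exact ⟨gr, xs.foldl (stepA g) [[a]], rfl, rfl, rfl⟩

-- On any (sorted) list, A's forward fold builds the same groups as the backward fold.
theorem groups_eq (g : Int) : ∀ (s : List Int),
    (match s with | [] => ([] : List (List Int)) | x :: xs => xs.foldl (stepA g) [[x]])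
      = s.foldr (fun a gs => stepB g gs a) [] := by
  intro s
  induction s with
  | nil => rfl
  | cons x xs ih =>
    cases xs with
    | nil => rfl
    | cons y ys =>
      simp only [List.foldr_cons] at ih ⊢
      rw [← ih]
      simp only [List.foldl_cons, stepA_single]
      obtain ⟨h', t', h1, h2, h3⟩ := foldl_stepA_cons_head g ys [y] x (by simp)
      rw [h1, show ([x] : List Int).getLastD 0 = x from rfl]
      cases h' with
      | nil => simp at h2
      | cons b bs =>
      simp only [List.head?_cons, Option.some.injEq] at h2
      subst h2
      simp only [stepB, List.headD_cons]
      by_cases h : b - x ≤ g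
      · rw [if_pos h, if_pos h]
        simpa using h3
      · rw [if_neg h, if_neg h,
          show ([[x], [b]] : List (List Int)) = [[x]] ++ [[b]] from rfl, foldl_stepA_append, h1]
        rfl

-- indexing a cons at a positive index reads the tail one position earlier
theorem pyGetD_cons_shift (x : Int) (s : List Int) (i : Int) (h1 : 1 ≤ i)
    (h2 : i ≤ (s.length : Int)) :
    PySem.List.pyGetD (x :: s) i 0 = PySem.List.pyGetD s (i - 1) 0 := by
  rw [PySem.List.pyGetD_eq_getElem (x :: s) 0 (by omega) (by simp; omega),
      PySem.List.pyGetD_eq_getElem s 0 (by omega) (by simp; omega)]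
  have h3 : i.toNat = (i - 1).toNat + 1 := by omega
  simp only [h3, List.getElem_cons_succ]

theorem pyRange_one_shift (a b : Int) :
    PySem.List.pyRange (a + 1) (b + 1) 1 = (PySem.List.pyRange a b 1).map (· + 1) := by
  rw [PySem.List.pyRange_one, PySem.List.pyRange_one,
      show b + 1 - (a + 1) = b - a by ring]
  simp only [List.map_map]
  apply List.map_congr_left
  intro k _
  simp only [Function.comp]
  ring

-- the cuts of x :: s are the cuts of s shifted by one, plus possibly a cut right after x
theorem cutsOf_cons (g x : Int) (s : List Int) (hs : s ≠ []) :
    cutsOf g (x :: s)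
      = (if PySem.List.pyGetD s 0 0 - x > g then [1] else []) ++ (cutsOf g s).map (· + 1) := by
  unfold cutsOf
  have hn : (1 : Int) ≤ (s.length : Int) := by
    have : s.length ≠ 0 := fun h => hs (List.eq_nil_of_length_eq_zero h)
    omega
  simp only [PySem.List.len_eq, List.length_cons]
  rw [show ((s.length + 1 : Nat) : Int) = (s.length : Int) + 1 by push_cast; ring,
      PySem.List.pyRange_one_cons (by omega),
      pyRange_one_shift 1 (s.length : Int)]
  rw [List.filter_cons, List.filter_map]
  have h1 : PySem.List.pyGetD (x :: s) 1 0 = PySem.List.pyGetD s 0 0 := by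
    simpa using pyGetD_cons_shift x s 1 (by omega) hn
  rw [List.filter_congr (l := PySem.List.pyRange 1 (s.length : Int) 1)
      (q := fun i => decide (PySem.List.pyGetD s i 0 - PySem.List.pyGetD s (i - 1) 0 > g)) ?_]
  · by_cases hc : PySem.List.pyGetD s 0 0 - x > g
    · rw [if_pos (by simp [h1, hc]), if_pos hc]; rfl
    · rw [if_neg (by simp [h1, hc]), if_neg hc]; rfl
  · intro i hi
    have hmem := (PySem.List.mem_pyRange_one).mp hi
    simp only [Function.comp]
    have ha : PySem.List.pyGetD (x :: s) (i + 1) 0 = PySem.List.pyGetD s i 0 := by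
      have := pyGetD_cons_shift x s (i + 1) (by omega) (by omega)
      simpa using this
    have hb : PySem.List.pyGetD (x :: s) (i + 1 - 1) 0 = PySem.List.pyGetD s (i - 1) 0 := by
      have : i + 1 - 1 = i := by ring
      rw [this]
      exact pyGetD_cons_shift x s i (by omega) (by omega)
    rw [ha, hb]

theorem mem_cutsOf_ge_one (g : Int) (s : List Int) (i : Int) (h : i ∈ cutsOf g s) : 1 ≤ i := by
  unfold cutsOf at h
  have := List.mem_filter.mp h
  exact ((PySem.List.mem_pyRange_one).mp this.1).1

-- slicing a cons at shifted bounds is slicing the tail at the original bounds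
theorem slice_cons_succ (x : Int) (s : List Int) (a b : Int) (ha : 0 ≤ a) (hb : 0 ≤ b) :
    PySem.List.slice (x :: s) (some (a + 1)) (some (b + 1)) = PySem.List.slice s (some a) (some b) := by
  rw [PySem.List.slice_toNat (x :: s) (by omega) (by omega),
      PySem.List.slice_toNat s ha hb]
  have h1 : (a + 1).toNat = a.toNat + 1 := by omega
  have h2 : (b + 1).toNat = b.toNat + 1 := by omega
  simp [h1, h2]

theorem slice_cons_zero (x : Int) (s : List Int) (b : Int) (hb : 0 ≤ b) :
    PySem.List.slice (x :: s) (some 0) (some (b + 1)) = x :: PySem.List.slice s (some 0) (some b) := by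
  rw [PySem.List.slice_toNat (x :: s) (by omega) (by omega),
      PySem.List.slice_toNat s (by omega) hb]
  have h2 : (b + 1).toNat = b.toNat + 1 := by omega
  simp [h2]

-- mapping the slice of a cons over shifted index pairs = mapping the slice of the tail
theorem map_slice_shift (x : Int) (s : List Int) : ∀ (z : List (Int × Int)),
    (∀ p ∈ z, 0 ≤ p.1 ∧ 0 ≤ p.2) →
    (z.map (Prod.map (· + 1) (· + 1))).map (fun p => PySem.List.slice (x :: s) (some p.1) (some p.2))
      = z.map (fun p => PySem.List.slice s (some p.1) (some p.2)) := by
  intro z hz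
  induction z with
  | nil => rfl
  | cons p ps ih =>
    have hp := hz p (by simp)
    simp only [List.map_cons, Prod.map]
    rw [slice_cons_succ x s p.1 p.2 hp.1 hp.2, ih (fun q hq => hz q (by simp [hq]))]

-- every bound in cuts ++ [len s] is nonnegative
theorem bounds_nonneg (g : Int) (s : List Int) (v : Int)
    (hv : v ∈ cutsOf g s ++ [(s.length : Int)]) : 0 ≤ v := by
  rcases List.mem_append.mp hv with h | h
  · have := mem_cutsOf_ge_one g s v h; omega
  · simp at h; omega

-- x::s sliced from 0 to 1 is [x]
theorem slice_cons_one (x : Int) (s : List Int) :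
    PySem.List.slice (x :: s) (some 0) (some 1) = [x] := by
  rw [PySem.List.slice_toNat (x :: s) (by omega) (by omega)]
  simp

-- the two-phase cut-and-slice construction equals the backward fold, on any nonempty list
theorem groupsOf_cutsOf_eq_foldr (g : Int) : ∀ (s : List Int), s ≠ [] →
    groupsOf s (cutsOf g s) = s.foldr (fun a gs => stepB g gs a) [] := by
  intro s
  induction s with
  | nil => intro h; exact absurd rfl h
  | cons x s ih =>
    intro _
    cases s with
    | nil =>
      simp only [groupsOf, cutsOf]
      simp [PySem.List.pyRange_one_eq_nil, PySem.List.slice_from_one, stepB,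
        PySem.List.slice_toNat]
    | cons y ys =>
      -- the tail s = y :: ys is nonempty; name its bounds list
      set s' : List Int := y :: ys with hs'
      have hne : s' ≠ [] := by simp [hs']
      rw [List.foldr_cons, ← ih hne]
      set cs : List Int := cutsOf g s' with hcs
      set bs : List Int := cs ++ [(s'.length : Int)] with hbs
      obtain ⟨c1, rest, hb1⟩ : ∃ c1 rest, bs = c1 :: rest := by
        cases hb : bs with
        | nil => simp [hbs] at hb
        | cons a l => exact ⟨a, l, rfl⟩
      have hbs_nonneg : ∀ v ∈ bs, 0 ≤ v := by
        intro v hv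
        exact bounds_nonneg g s' v (hbs ▸ hv)
      have hc1_pos : 1 ≤ c1 := by
        rcases List.mem_append.mp (hbs ▸ (hb1 ▸ (List.mem_cons_self : c1 ∈ c1 :: rest))) with h | h
        · exact mem_cutsOf_ge_one g s' c1 h
        · simp [hs'] at h; omega
      have hrest_nonneg : ∀ v ∈ rest, 0 ≤ v := by
        intro v hv
        exact hbs_nonneg v (hb1 ▸ List.mem_cons_of_mem c1 hv)
      have hznn : ∀ p ∈ (c1 :: rest).zip rest, 0 ≤ p.1 ∧ 0 ≤ p.2 := by
        intro p hp
        have h2 := List.of_mem_zip hp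
        refine ⟨?_, hrest_nonneg _ h2.2⟩
        rcases List.mem_cons.mp h2.1 with h | h
        · omega
        · exact hrest_nonneg _ h
      have hznn0 : ∀ p ∈ (0 :: c1 :: rest).zip (c1 :: rest), 0 ≤ p.1 ∧ 0 ≤ p.2 := by
        intro p hp
        have h2 := List.of_mem_zip hp
        have h3 : 0 ≤ p.2 := by
          rcases List.mem_cons.mp h2.2 with h | h
          · omega
          · exact hrest_nonneg _ h
        refine ⟨?_, h3⟩
        rcases List.mem_cons.mp h2.1 with h | h
        · omega
        · rcases List.mem_cons.mp h with h' | h'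
          · omega
          · exact hrest_nonneg _ h'
      -- groupsOf s' cs spelled out
      have hG : groupsOf s' cs
          = PySem.List.slice s' (some 0) (some c1)
            :: ((c1 :: rest).zip rest).map
                (fun p => PySem.List.slice s' (some p.1) (some p.2)) := by
        simp only [groupsOf]
        rw [PySem.List.slice_from_one]
        simp only [PySem.List.len_eq, ← hbs, hb1]
        rfl
      -- head of the first group is y
      have hhead : (PySem.List.slice s' (some 0) (some c1)).headD 0 = y := by
        rw [PySem.List.slice_toNat s' (by omega) (by omega)]
        have hk : c1.toNat = (c1.toNat - 1) + 1 := by omega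
        rw [show ((0 : Int)).toNat = 0 from rfl, List.drop_zero, Nat.sub_zero, hk]
        simp [hs']
      -- cuts of x :: s'
      have hcuts := cutsOf_cons g x s' hne
      have hy0 : PySem.List.pyGetD s' 0 0 = y := by simp [hs', PySem.List.pyGetD_zero_cons]
      rw [hy0] at hcuts
      -- the shifted bounds of x :: s'
      have hsh : cs.map (· + 1) ++ [((x :: s').length : Int)] = (c1 + 1) :: rest.map (· + 1) := by
        have : (((x :: s').length : Int)) = (s'.length : Int) + 1 := by simp
        rw [this, show ([(s'.length : Int) + 1] : List Int) = [(s'.length : Int)].map (· + 1) from rfl,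
            ← List.map_append, ← hbs, hb1, List.map_cons]
      rw [hG]
      by_cases hcnd : y - x ≤ g
      · -- no new cut right after x: x joins the first group
        rw [show stepB g (PySem.List.slice s' (some 0) (some c1)
              :: ((c1 :: rest).zip rest).map
                  (fun p => PySem.List.slice s' (some p.1) (some p.2))) x
            = (x :: PySem.List.slice s' (some 0) (some c1))
              :: ((c1 :: rest).zip rest).map
                  (fun p => PySem.List.slice s' (some p.1) (some p.2)) by
          simp only [stepB]
          rw [hhead, if_pos (by omega)]]
        simp only [groupsOf]
        rw [PySem.List.slice_from_one,
            show cutsOf g (x :: s') = cs.map (· + 1) by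
              rw [hcuts, if_neg (by omega)]; rfl]
        simp only [PySem.List.len_eq]
        rw [hsh]
        simp only [List.tail_cons]
        rw [List.zip_cons_cons, List.map_cons, slice_cons_zero x s' c1 (by omega),
            show (((c1 + 1) :: rest.map (· + 1)) : List Int) = (c1 :: rest).map (· + 1) by simp,
            List.zip_map, map_slice_shift x s' _ hznn]
      · -- a new cut right after x: x stays alone in the first group
        rw [show stepB g (PySem.List.slice s' (some 0) (some c1)
              :: ((c1 :: rest).zip rest).map
                  (fun p => PySem.List.slice s' (some p.1) (some p.2))) x
            = [x] :: PySem.List.slice s' (some 0) (some c1)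
              :: ((c1 :: rest).zip rest).map
                  (fun p => PySem.List.slice s' (some p.1) (some p.2)) by
          simp only [stepB]
          rw [hhead, if_neg (by omega)]]
        simp only [groupsOf]
        rw [PySem.List.slice_from_one,
            show cutsOf g (x :: s') = 1 :: cs.map (· + 1) by
              rw [hcuts, if_pos (by omega)]; rfl]
        simp only [PySem.List.len_eq, List.cons_append]
        rw [hsh]
        simp only [List.tail_cons]
        rw [List.zip_cons_cons, List.map_cons, slice_cons_one,
            show ((1 :: (c1 + 1) :: rest.map (· + 1)) : List Int)
              = (0 :: c1 :: rest).map (· + 1) by simp,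
            show (((c1 + 1) :: rest.map (· + 1)) : List Int) = (c1 :: rest).map (· + 1) by simp,
            List.zip_map, map_slice_shift x s' _ hznn0, List.zip_cons_cons, List.map_cons]

-- ===== VERDICT (by name: the statement is the Claim_ definition above) =====
theorem smart_group_registers_py_spec : Claim_equal_smart_group_registers_py := by
  intro addresses max_gap _
  unfold Spec_smart_group_registers_py smart_group_registers_py smart_group_registers_py_alt
  by_cases ha : addresses = []
  · subst ha; rfl
  · rw [if_neg ha]
    have hs : PySem.List.sorted addresses (fun x => x) false ≠ [] := by
      intro h; exact ha ((PySem.List.sorted_eq_nil_iff _ _ _).mp h)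
    rw [if_neg hs, groupsOf_cutsOf_eq_foldr max_gap _ hs, ← groups_eq max_gap]
    rcases hE : PySem.List.sorted addresses (fun x => x) false with _ | ⟨x, xs⟩
    · exact absurd hE hs
    · simp [PySem.List.slice_from_one]
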